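-- pv_equiv track=rewrite | github.com/Jaovaz13/Painelgv | analytics/insights.py | _generate_cluster_name
-- ===== SOURCE A (Python) =====
-- from typing import Dict, List, Tuple, Optional, Any
--
-- def _generate_cluster_name(indicators: List[str]) -> str:
--     """Gera nome descritivo para o cluster baseado nos indicadores."""
--     indicators_lower = [ind.lower() for ind in indicators]
--
--     # Heurística para nomear clusters
--     if any("pib" in ind for ind in indicators_lower):
--         return "Cluster Econômico"
--     elif any("emprego" in ind or "trabalho" in ind for ind in indicators_lower):
--         return "Cluster Trabalhista"
--     elif any("educacao" in ind or "escola" in ind for ind in indicators_lower):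
--         return "Cluster Educacional"
--     elif any("saude" in ind or "mortalidade" in ind for ind in indicators_lower):
--         return "Cluster de Saúde"
--     elif any("sustent" in ind or "idsc" in ind or "emissao" in ind for ind in indicators_lower):
--         return "Cluster de Sustentabilidade"
--     else:
--         return f"Cluster Temático ({len(indicators)} indicadores)"
-- ===== SOURCE B (Python) =====
-- from typing import List
--
-- _KWS = [("pib",), ("emprego", "trabalho"), ("educacao", "escola"),
--         ("saude", "mortalidade"), ("sustent", "idsc", "emissao")]
-- _NAMES = ["Cluster Econômico", "Cluster Trabalhista", "Cluster Educacional",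
--           "Cluster de Saúde", "Cluster de Sustentabilidade"]
--
-- def _generate_cluster_name(indicators: List[str]) -> str:
--     """Gera nome descritivo para o cluster baseado nos indicadores."""
--     # Single pass over the indicators, accumulating one match flag per category.
--     found = [False] * len(_KWS)
--     for ind in indicators:
--         low = ind.lower()
--         found = [f or any(k in low for k in kws) for f, kws in zip(found, _KWS)]
--     # First category whose flag is set wins.
--     for flag, name in zip(found, _NAMES):
--         if flag:
--             return name
--     return f"Cluster Temático ({len(indicators)} indicadores)"
-- ===== Notes on version B (the rewrite author's own statement) =====
-- stated objective: alternative
-- what changed: Instead of A's five sequential any()-scans over the whole list with early returns, B makes a single pass over the indicators accumulating a vector of per-category match flags, then maps the first set flag to its name.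
import Mathlib
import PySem

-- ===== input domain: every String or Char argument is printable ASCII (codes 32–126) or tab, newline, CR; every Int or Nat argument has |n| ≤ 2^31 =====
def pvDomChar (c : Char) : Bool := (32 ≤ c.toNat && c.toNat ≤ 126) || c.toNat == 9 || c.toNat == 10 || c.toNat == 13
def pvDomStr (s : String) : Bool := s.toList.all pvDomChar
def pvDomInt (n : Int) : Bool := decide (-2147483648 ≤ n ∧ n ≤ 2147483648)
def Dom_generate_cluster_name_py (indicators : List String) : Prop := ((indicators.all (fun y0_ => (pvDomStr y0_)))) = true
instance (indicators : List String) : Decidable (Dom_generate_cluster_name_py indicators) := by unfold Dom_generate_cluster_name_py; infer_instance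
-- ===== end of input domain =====

-- B replaces A's five sequential any()-scans with one pass accumulating per-category flags (alternative, same cost).

-- ===== PORT A =====
def generate_cluster_name_py (indicators : List String) : String :=
  let indicators_lower := indicators.map PySem.Str.lower
  if indicators_lower.any (fun ind => PySem.Str.isIn "pib" ind) then
    "Cluster Econômico"
  else if indicators_lower.any (fun ind => PySem.Str.isIn "emprego" ind || PySem.Str.isIn "trabalho" ind) then
    "Cluster Trabalhista"
  else if indicators_lower.any (fun ind => PySem.Str.isIn "educacao" ind || PySem.Str.isIn "escola" ind) then
    "Cluster Educacional"
  else if indicators_lower.any (fun ind => PySem.Str.isIn "saude" ind || PySem.Str.isIn "mortalidade" ind) then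
    "Cluster de Saúde"
  else if indicators_lower.any (fun ind => PySem.Str.isIn "sustent" ind || PySem.Str.isIn "idsc" ind || PySem.Str.isIn "emissao" ind) then
    "Cluster de Sustentabilidade"
  else
    "Cluster Temático (" ++ PySem.Int.toStr (indicators.length : Int) ++ " indicadores)"

-- ===== PORT B =====
def pvKws : List (List String) :=
  [["pib"], ["emprego", "trabalho"], ["educacao", "escola"],
   ["saude", "mortalidade"], ["sustent", "idsc", "emissao"]]

def pvNames : List String :=
  ["Cluster Econômico", "Cluster Trabalhista", "Cluster Educacional",
   "Cluster de Saúde", "Cluster de Sustentabilidade"]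

-- the per-indicator flag update: found = [f or any(k in low for k in kws) for f, kws in zip(found, _KWS)]
def pvUpdate (low : String) : List Bool → List (List String) → List Bool
  | f :: fs, kws :: rest => (f || kws.any (fun k => PySem.Str.isIn k low)) :: pvUpdate low fs rest
  | _, _ => []

-- the single pass over the indicators
def pvScan : List String → List Bool → List Bool
  | [], found => found
  | ind :: rest, found => pvScan rest (pvUpdate (PySem.Str.lower ind) found pvKws)

-- `for flag, name in zip(found, _NAMES): if flag: return name`
def pvSelect : List (Bool × String) → Option String
  | [] => none
  | (flag, name) :: rest => if flag then some name else pvSelect rest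

def generate_cluster_name_py_alt (indicators : List String) : String :=
  let found := pvScan indicators (List.replicate pvKws.length false)
  match pvSelect (found.zip pvNames) with
  | some name => name
  | none => "Cluster Temático (" ++ PySem.Int.toStr (indicators.length : Int) ++ " indicadores)"

-- ===== PRECONDITION & SPEC =====
def Spec_generate_cluster_name_py (indicators : List String) (out : String) : Prop := out = generate_cluster_name_py_alt indicators
instance (indicators : List String) (out : String) : Decidable (Spec_generate_cluster_name_py indicators out) := by unfold Spec_generate_cluster_name_py; infer_instance

-- ===== CLAIM (what is proved, stated in full; the proofs are below) =====
def Claim_equal_generate_cluster_name_py : Prop := ∀ (indicators : List String), Dom_generate_cluster_name_py indicators → Spec_generate_cluster_name_py indicators (generate_cluster_name_py indicators)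

-- ===== LEMMAS AND PROOFS =====

-- the scan computes, for each category, the OR of its flag with "some indicator matches it"
theorem pvScan_eq (inds : List String) (f0 f1 f2 f3 f4 : Bool) :
    pvScan inds [f0, f1, f2, f3, f4] =
      [f0 || inds.any (fun s => PySem.Str.isIn "pib" (PySem.Str.lower s)),
       f1 || inds.any (fun s => PySem.Str.isIn "emprego" (PySem.Str.lower s) || PySem.Str.isIn "trabalho" (PySem.Str.lower s)),
       f2 || inds.any (fun s => PySem.Str.isIn "educacao" (PySem.Str.lower s) || PySem.Str.isIn "escola" (PySem.Str.lower s)),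
       f3 || inds.any (fun s => PySem.Str.isIn "saude" (PySem.Str.lower s) || PySem.Str.isIn "mortalidade" (PySem.Str.lower s)),
       f4 || inds.any (fun s => PySem.Str.isIn "sustent" (PySem.Str.lower s) || PySem.Str.isIn "idsc" (PySem.Str.lower s) || PySem.Str.isIn "emissao" (PySem.Str.lower s))] := by
  induction inds generalizing f0 f1 f2 f3 f4 with
  | nil => simp [pvScan]
  | cons a t ih =>
      simp only [pvScan, pvUpdate, pvKws, List.any_cons, List.any_nil, Bool.or_false]
      rw [ih]
      simp [Bool.or_assoc]

-- ===== VERDICT (by name: the statement is the Claim_ definition above) =====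
theorem generate_cluster_name_py_spec : Claim_equal_generate_cluster_name_py := by
  intro indicators _
  unfold Spec_generate_cluster_name_py generate_cluster_name_py generate_cluster_name_py_alt
  have h : List.replicate pvKws.length false = [false, false, false, false, false] := by decide
  rw [h, pvScan_eq]
  simp only [Bool.false_or, pvNames, List.zip_cons_cons, List.zip_nil_right, pvSelect,
    List.any_map, Function.comp_def]
  split_ifs <;> rfl
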